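-- pv_equiv track=rewrite | github.com/gopheruz/pdp_programming | dekabr/04.12.2024/parking.py | recommended_spaces
-- ===== SOURCE A (Python) =====
-- def recommended_spaces(row, col, parking, n):
--     empty_spaces = []
--     for i in range(n):
--         for j in range(n):
--             if parking[i][j] == 0:
--                 distance = abs(i - row) + abs(j - col)
--                 empty_spaces.append((distance, i, j))
--     empty_spaces.sort()
--     return empty_spaces[:10]
-- ===== SOURCE B (Python) =====
-- def recommended_spaces(row, col, parking, n):
--     # Counting-sort by Manhattan distance: one scan drops cells into per-distance
--     # buckets (distances span at most 2*n-1 consecutive values starting at the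
--     # distance of the grid point nearest to (row, col)), so no comparison sort.
--     if n <= 0:
--         return []
--     base = abs(min(max(row, 0), n - 1) - row) + abs(min(max(col, 0), n - 1) - col)
--     buckets = [[] for _ in range(2 * n - 1)]
--     for i in range(n):
--         di = abs(i - row)
--         prow = parking[i]
--         for j in range(n):
--             if prow[j] == 0:
--                 d = di + abs(j - col)
--                 buckets[d - base].append((d, i, j))
--     return [t for b in buckets for t in b][:10]
-- ===== Notes on version B (the rewrite author's own statement) =====
-- stated objective: faster
-- what changed: Replaces the full comparison sort of all empty cells by a single-scan counting sort into per-Manhattan-distance buckets (at most 2n-1 consecutive distance values), concatenated in distance order and truncated to 10, so no sort is needed.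
-- outside the precondition, e.g. on recommended_spaces(0, 0, [[0, 1]], 2): A raises IndexError, B raises IndexError
import Mathlib
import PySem

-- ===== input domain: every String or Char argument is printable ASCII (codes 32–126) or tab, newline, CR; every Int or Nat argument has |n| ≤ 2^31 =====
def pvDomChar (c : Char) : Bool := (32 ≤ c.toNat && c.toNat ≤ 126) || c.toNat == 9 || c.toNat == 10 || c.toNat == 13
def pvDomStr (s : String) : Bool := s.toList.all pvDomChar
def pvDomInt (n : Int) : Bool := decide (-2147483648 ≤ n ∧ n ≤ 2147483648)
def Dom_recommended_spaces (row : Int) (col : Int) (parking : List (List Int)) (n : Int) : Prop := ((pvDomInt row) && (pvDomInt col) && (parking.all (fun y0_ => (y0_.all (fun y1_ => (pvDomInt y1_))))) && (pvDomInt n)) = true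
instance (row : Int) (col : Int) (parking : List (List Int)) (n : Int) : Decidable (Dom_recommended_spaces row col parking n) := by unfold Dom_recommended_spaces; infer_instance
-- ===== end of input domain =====

-- B replaces the full comparison sort of all empty cells by a counting sort into
-- per-distance buckets (distances form at most 2*n-1 consecutive values), so the
-- sort disappears. Return value only (neither version mutates its arguments).

-- ===== PORT A =====
-- Python's default tuple order on (distance, i, j): lexicographic, modelled by the Lex key.
def pvKey3 (t : Int × Int × Int) : Lex (Int × Lex (Int × Int)) := toLex (t.1, toLex (t.2.1, t.2.2))

def recommended_spaces (row : Int) (col : Int) (parking : List (List Int)) (n : Int) : List (Int × Int × Int) :=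
  -- parking[i][j]: in range under Pre_, so pyGetD with a non-zero default is exact there
  let empty_spaces :=
    (PySem.List.pyRange 0 n 1).foldl (fun acc i =>
      (PySem.List.pyRange 0 n 1).foldl (fun acc j =>
        if PySem.List.pyGetD (PySem.List.pyGetD parking i []) j 1 == 0 then
          acc ++ [(|i - row| + |j - col|, i, j)]
        else acc) acc) []
  PySem.List.slice (PySem.List.sorted empty_spaces pvKey3 false) none (some 10)

-- ===== PORT B =====
-- base = abs(min(max(row, 0), n - 1) - row) + abs(min(max(col, 0), n - 1) - col)
def pvBase (row col n : Int) : Int :=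
  |min (max row 0) (n - 1) - row| + |min (max col 0) (n - 1) - col|

-- buckets[k].append(t): every index used is proved in range (pv_emit_bounds below),
-- where List.set / List.getD agree exactly with Python list indexing.
def pvAppendAt (bs : List (List (Int × Int × Int))) (k : Int) (t : Int × Int × Int) :
    List (List (Int × Int × Int)) :=
  bs.set k.toNat (bs.getD k.toNat [] ++ [t])

def recommended_spaces_alt (row : Int) (col : Int) (parking : List (List Int)) (n : Int) : List (Int × Int × Int) :=
  if n ≤ 0 then []
  else
    let base := pvBase row col n
    let buckets0 := (PySem.List.pyRange 0 (2 * n - 1) 1).map (fun _ => ([] : List (Int × Int × Int)))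
    let buckets :=
      (PySem.List.pyRange 0 n 1).foldl (fun bs i =>
        let di := |i - row|
        let prow := PySem.List.pyGetD parking i []
        (PySem.List.pyRange 0 n 1).foldl (fun bs j =>
          if PySem.List.pyGetD prow j 1 == 0 then
            pvAppendAt bs (di + |j - col| - base) (di + |j - col|, i, j)
          else bs) bs) buckets0
    PySem.List.slice (buckets.foldl (fun out b => out ++ b) []) none (some 10)

-- ===== PRECONDITION & SPEC =====
-- Pre_ excludes exactly the inputs where Python A raises IndexError:
-- fewer than n rows, or one of the first n rows shorter than n.
def Pre_recommended_spaces (row : Int) (col : Int) (parking : List (List Int)) (n : Int) : Prop :=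
  n ≤ (parking.length : Int) ∧ ∀ r ∈ parking.take n.toNat, n ≤ (r.length : Int)
instance (row : Int) (col : Int) (parking : List (List Int)) (n : Int) : Decidable (Pre_recommended_spaces row col parking n) := by unfold Pre_recommended_spaces; infer_instance

def pvWitness_recommended_spaces : Int × Int × List (List Int) × Int := (0, 1, [[1, 0], [0, 1]], 2)

def Spec_recommended_spaces (row : Int) (col : Int) (parking : List (List Int)) (n : Int) (out : List (Int × Int × Int)) : Prop := out = recommended_spaces_alt row col parking n
instance (row : Int) (col : Int) (parking : List (List Int)) (n : Int) (out : List (Int × Int × Int)) : Decidable (Spec_recommended_spaces row col parking n out) := by unfold Spec_recommended_spaces; infer_instance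

-- ===== CLAIM (what is proved, stated in full; the proofs are below) =====
def Claim_equal_recommended_spaces : Prop := ∀ (row : Int) (col : Int) (parking : List (List Int)) (n : Int), Dom_recommended_spaces row col parking n → Pre_recommended_spaces row col parking n → Spec_recommended_spaces row col parking n (recommended_spaces row col parking n)

-- ===== LEMMAS AND PROOFS =====

-- The list of empty cells in row-major scan order, as both loops emit it.
def pvEmit (row col : Int) (parking : List (List Int)) (n : Int) : List (Int × Int × Int) :=
  (PySem.List.pyRange 0 n 1).flatMap (fun i =>
    ((PySem.List.pyRange 0 n 1).filter
        (fun j => PySem.List.pyGetD (PySem.List.pyGetD parking i []) j 1 == 0)).map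
      (fun j => (|i - row| + |j - col|, i, j)))

def pvIdx (row col n : Int) (t : Int × Int × Int) : Nat := (t.1 - pvBase row col n).toNat

-- scan-order on (i, j)
def pvLtIJ (a b : Int × Int × Int) : Prop :=
  a.2.1 < b.2.1 ∨ (a.2.1 = b.2.1 ∧ a.2.2 < b.2.2)

lemma pv_A_eq (row col : Int) (parking : List (List Int)) (n : Int) :
    recommended_spaces row col parking n =
      PySem.List.slice (PySem.List.sorted (pvEmit row col parking n) pvKey3 false) none (some 10) := by
  unfold recommended_spaces pvEmit
  simp only [PySem.List.foldl_append_if, PySem.List.foldl_append_eq_flatMap, List.nil_append]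

lemma pv_set_map_range {T : Type} (A : Nat → T) (m k : Nat) (hk : k < m) (v : T) :
    ((List.range m).map A).set k v = (List.range m).map (fun k' => if k' = k then v else A k') := by
  apply List.ext_getElem
  · simp
  · intro i h1 h2
    simp only [List.length_set, List.length_map, List.length_range] at h1
    simp only [List.getElem_set, List.getElem_map, List.getElem_range]
    by_cases h : i = k
    · subst h; simp
    · rw [if_neg (fun hh => h hh.symm), if_neg h]

lemma pv_bucket_fold {T : Type} [DecidableEq T] (idx : T → Nat) (m : Nat) :
    ∀ (E : List T) (A : Nat → List T), (∀ t ∈ E, idx t < m) →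
      E.foldl (fun bs t => bs.set (idx t) (bs.getD (idx t) [] ++ [t])) ((List.range m).map A)
        = (List.range m).map (fun k => A k ++ E.filter (fun t => idx t = k)) := by
  intro E
  induction E with
  | nil => intro A _; simp
  | cons t E ih =>
    intro A h
    have ht : idx t < m := h t (List.mem_cons_self ..)
    rw [List.foldl_cons, PySem.List.getD_map_range A m (idx t) [] ht,
        pv_set_map_range A m (idx t) ht,
        ih _ (fun x hx => h x (List.mem_cons_of_mem _ hx))]
    apply List.map_congr_left
    intro k _
    by_cases hk : k = idx t
    · subst hk; simp [List.filter_cons]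
    · simp [List.filter_cons, hk]
      omega

lemma pv_emit_bounds (row col : Int) (parking : List (List Int)) (n : Int) :
    ∀ t ∈ pvEmit row col parking n,
      pvBase row col n ≤ t.1 ∧ pvIdx row col n t < (2 * n - 1).toNat := by
  intro t ht
  simp only [pvEmit, List.mem_flatMap, List.mem_map, List.mem_filter,
    PySem.List.mem_pyRange_one] at ht
  obtain ⟨i, ⟨hi0, hin⟩, j, ⟨⟨hj0, hjn⟩, -⟩, rfl⟩ := ht
  unfold pvIdx pvBase
  simp only [Int.abs_eq_natAbs, Int.min_def, Int.max_def]
  constructor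
  · split_ifs <;> omega
  · split_ifs <;> omega

lemma pv_B_eq (row col : Int) (parking : List (List Int)) (n : Int) (hn : 0 < n) :
    recommended_spaces_alt row col parking n =
      PySem.List.slice
        (((List.range (2 * n - 1).toNat).map
            (fun k => (pvEmit row col parking n).filter (fun t => pvIdx row col n t = k))).flatten)
        none (some 10) := by
  unfold recommended_spaces_alt
  rw [if_neg (by omega)]
  have hinit : (PySem.List.pyRange 0 (2 * n - 1) 1).map (fun _ => ([] : List (Int × Int × Int)))
      = (List.range (2 * n - 1).toNat).map (fun _ => ([] : List (Int × Int × Int))) := by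
    rw [PySem.List.pyRange_one, List.map_map]
    have h1 : ((fun _ => ([] : List (Int × Int × Int))) ∘ fun k : Nat => (0 : Int) + (k : Int))
        = (fun _ => ([] : List (Int × Int × Int))) := rfl
    rw [h1]
    congr 2
    omega
  simp only [pvAppendAt, PySem.List.foldl_if_eq_foldl_filter, hinit]
  have hmapfold : ∀ (i : Int) (bs : List (List (Int × Int × Int))),
      ((PySem.List.pyRange 0 n 1).filter
          (fun j => PySem.List.pyGetD (PySem.List.pyGetD parking i []) j 1 == 0)).foldl
        (fun bs j => bs.set (|i - row| + |j - col| - pvBase row col n).toNat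
          (bs.getD (|i - row| + |j - col| - pvBase row col n).toNat [] ++ [(|i - row| + |j - col|, i, j)])) bs
      = (((PySem.List.pyRange 0 n 1).filter
            (fun j => PySem.List.pyGetD (PySem.List.pyGetD parking i []) j 1 == 0)).map
          (fun j => (|i - row| + |j - col|, i, j))).foldl
          (fun bs t => bs.set (pvIdx row col n t) (bs.getD (pvIdx row col n t) [] ++ [t])) bs := by
    intro i bs
    rw [List.foldl_map]
    rfl
  simp only [hmapfold]
  rw [← List.foldl_flatMap]
  rw [show ((PySem.List.pyRange 0 n 1).flatMap fun i =>
      ((PySem.List.pyRange 0 n 1).filter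
          (fun j => PySem.List.pyGetD (PySem.List.pyGetD parking i []) j 1 == 0)).map
        (fun j => (|i - row| + |j - col|, i, j))) = pvEmit row col parking n from rfl]
  rw [pv_bucket_fold (pvIdx row col n) (2 * n - 1).toNat (pvEmit row col parking n)
        (fun _ => []) (fun t ht => (pv_emit_bounds row col parking n t ht).2)]
  simp only [List.nil_append, PySem.List.foldl_append_eq_flatten]

lemma pv_flatten_buckets_perm {T : Type} [DecidableEq T] (idx : T → Nat) (E : List T) :
    ∀ (m : Nat),
      (((List.range m).map (fun k => E.filter (fun t => idx t = k))).flatten).Perm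
        (E.filter (fun t => idx t < m)) := by
  intro m
  induction m with
  | zero => simp
  | succ m ih =>
    rw [List.range_succ, List.map_append, List.flatten_append]
    simp only [List.map_cons, List.map_nil, List.flatten_cons, List.flatten_nil, List.append_nil]
    have h1 : (E.filter (fun t => idx t < m + 1)).filter (fun t => idx t < m)
        = E.filter (fun t => idx t < m) := by
      rw [List.filter_filter]
      apply List.filter_congr
      intro t _
      by_cases h : idx t < m <;> simp [h] <;> omega
    have h2 : (E.filter (fun t => idx t < m + 1)).filter (fun t => !decide (idx t < m))
        = E.filter (fun t => idx t = m) := by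
      rw [List.filter_filter]
      apply List.filter_congr
      intro t _
      by_cases h : idx t = m
      · simp [h]
      · by_cases h' : idx t < m + 1 <;> simp [h, h'] <;> omega
    have := List.filter_append_perm (fun t => decide (idx t < m)) (E.filter (fun t => idx t < m + 1))
    rw [h1, h2] at this
    exact (ih.append (List.Perm.refl _)).trans this

lemma pv_emit_pairwise (row col : Int) (parking : List (List Int)) (n : Int) :
    (pvEmit row col parking n).Pairwise pvLtIJ := by
  unfold pvEmit
  rw [List.pairwise_flatMap]
  constructor
  · intro i _
    rw [List.pairwise_map]
    exact ((PySem.List.pairwise_lt_pyRange_one 0 n).filter _).imp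
      (fun h => Or.inr ⟨rfl, h⟩)
  · exact (PySem.List.pairwise_lt_pyRange_one 0 n).imp (by
      intro i1 i2 h x hx y hy
      obtain ⟨_, _, rfl⟩ := List.mem_map.mp hx
      obtain ⟨_, _, rfl⟩ := List.mem_map.mp hy
      exact Or.inl h)

lemma pv_key_lt {a b : Int × Int × Int} (h : a.1 < b.1 ∨ (a.1 = b.1 ∧ pvLtIJ a b)) :
    pvKey3 a < pvKey3 b := by
  rcases h with h | ⟨h1, h2⟩
  · exact Prod.Lex.lt_iff.mpr (Or.inl h)
  · refine Prod.Lex.lt_iff.mpr (Or.inr ⟨h1, ?_⟩)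
    rcases h2 with h | ⟨h3, h4⟩
    · exact Prod.Lex.lt_iff.mpr (Or.inl h)
    · exact Prod.Lex.lt_iff.mpr (Or.inr ⟨h3, h4⟩)

lemma pv_sorted_eq (row col : Int) (parking : List (List Int)) (n : Int) :
    PySem.List.sorted (pvEmit row col parking n) pvKey3 false =
      ((List.range (2 * n - 1).toNat).map
        (fun k => (pvEmit row col parking n).filter (fun t => pvIdx row col n t = k))).flatten := by
  apply PySem.List.sorted_eq_of_perm_of_pairwise_lt
  · refine (pv_flatten_buckets_perm (pvIdx row col n) (pvEmit row col parking n)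
      (2 * n - 1).toNat).trans ?_
    rw [List.filter_eq_self.mpr]
    intro t ht
    exact decide_eq_true (pv_emit_bounds row col parking n t ht).2
  · rw [List.pairwise_flatten]
    constructor
    · intro l hl
      obtain ⟨k, -, rfl⟩ := List.mem_map.mp hl
      have hpw : ((pvEmit row col parking n).filter (fun t => pvIdx row col n t = k)).Pairwise pvLtIJ :=
        (pv_emit_pairwise row col parking n).filter _
      refine hpw.imp_of_mem ?_
      intro a b ha hb hab
      obtain ⟨haE, hak⟩ := List.mem_filter.mp ha
      obtain ⟨hbE, hbk⟩ := List.mem_filter.mp hb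
      have h1 := (pv_emit_bounds row col parking n a haE).1
      have h2 := (pv_emit_bounds row col parking n b hbE).1
      have hak' := of_decide_eq_true hak
      have hbk' := of_decide_eq_true hbk
      unfold pvIdx at hak' hbk'
      exact pv_key_lt (Or.inr ⟨by omega, hab⟩)
    · rw [List.pairwise_map]
      refine (List.pairwise_lt_range).imp_of_mem ?_
      intro k1 k2 _ _ hk x hx y hy
      obtain ⟨hxE, hxk⟩ := List.mem_filter.mp hx
      obtain ⟨hyE, hyk⟩ := List.mem_filter.mp hy
      have h1 := (pv_emit_bounds row col parking n x hxE).1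
      have h2 := (pv_emit_bounds row col parking n y hyE).1
      have hxk' := of_decide_eq_true hxk
      have hyk' := of_decide_eq_true hyk
      unfold pvIdx at hxk' hyk'
      exact pv_key_lt (Or.inl (by omega))

-- ===== VERDICT (by name: the statement is the Claim_ definition above) =====
theorem recommended_spaces_spec : Claim_equal_recommended_spaces := by
  intro row col parking n _ _
  unfold Spec_recommended_spaces
  by_cases hn : n ≤ 0
  · rw [pv_A_eq]
    unfold recommended_spaces_alt
    rw [if_pos hn]
    have : pvEmit row col parking n = [] := by
      unfold pvEmit
      rw [PySem.List.pyRange_one_eq_nil hn]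
      rfl
    rw [this]
    rw [PySem.List.slice_to _ (by norm_num)]
    rfl
  · rw [pv_A_eq, pv_sorted_eq, ← pv_B_eq row col parking n (by omega)]
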